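-- pv_equiv track=rewrite | github.com/mmishra4/DSA | ArrayMath.py | nthMagicNo
-- ===== SOURCE A (Python) =====
-- def nthMagicNo(A):
--     pow = 1
--     answer = 0
--     # Go through every bit of n
--     while (A):
--         pow = pow*5
--         # If last bit of n is set
--         if (A & 1):
--             answer += pow
--         # proceed to next bit
--         A >>= 1 # or n = n/2
--     return answer
-- ===== SOURCE B (Python) =====
-- def nthMagicNo(A):
--     if A == 0:
--         return 0
--     return 5 * int(format(A, 'b'), 5)
-- ===== Notes on version B (the rewrite author's own statement) =====
-- stated objective: idiomatic
-- what changed: Replaces the explicit bit-walk with a running power-of-5 accumulator by rendering A's binary digit string and reinterpreting it as a base-5 numeral times 5.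
import Mathlib
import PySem

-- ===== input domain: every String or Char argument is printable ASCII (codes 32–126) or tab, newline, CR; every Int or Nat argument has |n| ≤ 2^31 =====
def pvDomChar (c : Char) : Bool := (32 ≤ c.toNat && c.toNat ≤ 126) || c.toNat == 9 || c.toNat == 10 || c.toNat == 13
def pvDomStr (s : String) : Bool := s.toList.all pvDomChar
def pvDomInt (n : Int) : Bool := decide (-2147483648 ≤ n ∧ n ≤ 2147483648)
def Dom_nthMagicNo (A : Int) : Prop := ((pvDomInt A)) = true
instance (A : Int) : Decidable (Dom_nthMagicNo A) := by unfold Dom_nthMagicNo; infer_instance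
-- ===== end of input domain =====

-- B replaces A's bit-walk/accumulator loop with format(A,'b') reinterpreted in base 5 times 5 (idiomatic, same cost).


-- ===== PORT A =====
-- while (A): pow*=5; if A&1: answer+=pow; A>>=1
-- Python's A&1 equals floor-mod A 2 and A>>1 equals floor-div A 2 for every int (two's complement),
-- ported exactly with PySem.Int.mod / PySem.Int.floordiv; fuel makes the loop total (enough for A ≥ 0).
def nthMagicNoLoop : Nat → Int → Int → Int → Int
  | 0, _, _, answer => answer
  | fuel + 1, A, pow, answer =>
      if A ≠ 0 then
        let pow := pow * 5
        let answer := if PySem.Int.mod A 2 ≠ 0 then answer + pow else answer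
        nthMagicNoLoop fuel (PySem.Int.floordiv A 2) pow answer
      else answer

def nthMagicNo (A : Int) : Int := nthMagicNoLoop (A.toNat + 1) A 1 0

-- ===== PORT B =====
-- format(n,'b') for n > 0: most-significant-first binary digit characters
def binStr : Nat → List Char
  | 0 => []
  | n + 1 => binStr ((n + 1) / 2) ++ [if (n + 1) % 2 = 1 then '1' else '0']
decreasing_by exact Nat.div_lt_self (Nat.succ_pos n) (by omega)

-- int(s, 5) on a digit string (digits here are only '0'/'1')
def parseBase5 (s : List Char) : Int :=
  s.foldl (fun acc c => acc * 5 + (if c = '1' then 1 else 0)) 0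

def nthMagicNo_alt (A : Int) : Int :=
  if A = 0 then 0
  else
    -- format(A,'b') = '-' ++ binary of |A| when A < 0; int(·,5) honours the sign
    let v := parseBase5 (binStr A.natAbs)
    5 * (if A < 0 then -v else v)

-- ===== PRECONDITION & SPEC =====
-- Pre_ excludes A < 0, on which A's while-loop never terminates (A >>= 1 stays negative).
def Pre_nthMagicNo (A : Int) : Prop := 0 ≤ A
instance (A : Int) : Decidable (Pre_nthMagicNo A) := by unfold Pre_nthMagicNo; infer_instance
def pvWitness_nthMagicNo : Int := 6

def Spec_nthMagicNo (A : Int) (out : Int) : Prop := out = nthMagicNo_alt A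
instance (A : Int) (out : Int) : Decidable (Spec_nthMagicNo A out) := by unfold Spec_nthMagicNo; infer_instance

-- ===== CLAIM (what is proved, stated in full; the proofs are below) =====
def Claim_equal_nthMagicNo : Prop := ∀ (A : Int), Dom_nthMagicNo A → Pre_nthMagicNo A → Spec_nthMagicNo A (nthMagicNo A)

-- ===== LEMMAS AND PROOFS =====
theorem parseBase5_step (n : Nat) (h : n ≠ 0) :
    parseBase5 (binStr n) = 5 * parseBase5 (binStr (n / 2)) + ((n % 2 : Nat) : Int) := by
  obtain ⟨m, rfl⟩ : ∃ m, n = m + 1 := ⟨n - 1, by omega⟩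
  rw [binStr]
  unfold parseBase5
  rw [List.foldl_append]
  simp only [List.foldl]
  rcases Nat.mod_two_eq_zero_or_one (m + 1) with h2 | h2 <;> simp [h2] <;> ring

theorem loop_eq (fuel : Nat) : ∀ (n : Nat), n < fuel → ∀ (pow ans : Int),
    nthMagicNoLoop fuel (n : Int) pow ans = ans + pow * 5 * parseBase5 (binStr n) := by
  induction fuel with
  | zero => intro n h; omega
  | succ f ih =>
    intro n h pow ans
    by_cases hn : n = 0
    · subst hn; simp [nthMagicNoLoop, binStr, parseBase5]
    · have hne : (n : Int) ≠ 0 := by exact_mod_cast hn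
      rw [nthMagicNoLoop]
      simp only [hne, if_true, ne_eq]
      have hfd : PySem.Int.floordiv (n : Int) 2 = ((n / 2 : Nat) : Int) :=
        PySem.Int.floordiv_natCast n 2
      have hmd : PySem.Int.mod (n : Int) 2 = ((n % 2 : Nat) : Int) :=
        PySem.Int.mod_natCast n 2
      rw [hfd, hmd, ih (n / 2) (by omega)]
      rw [parseBase5_step n hn]
      rcases Nat.mod_two_eq_zero_or_one n with h2 | h2 <;> simp [h2] <;> push_cast <;> ring

-- ===== VERDICT (by name: the statement is the Claim_ definition above) =====
theorem nthMagicNo_spec : Claim_equal_nthMagicNo := by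
  intro A _ hpre
  unfold Spec_nthMagicNo nthMagicNo nthMagicNo_alt
  obtain ⟨n, rfl⟩ : ∃ n : Nat, A = (n : Int) := ⟨A.toNat, (Int.toNat_of_nonneg hpre).symm⟩
  rw [loop_eq (((n : Int)).toNat + 1) n (by simp)]
  by_cases hn : n = 0
  · subst hn; simp [binStr, parseBase5]
  · have h1 : (n : Int) ≠ 0 := by exact_mod_cast hn
    have h2 : ¬ ((n : Int) < 0) := by exact_mod_cast Nat.not_lt_zero n
    simp [h2, hn]
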